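-- pv_equiv track=rewrite | github.com/AnjishnuSengupta/nyanime | anipy_api_service/main.py | list_languages
-- ===== SOURCE A (Python) =====
-- from typing import Any, Dict, List, Optional, Tuple
--
-- def list_languages(lang_set: Any) -> List[str]:
--     names: List[str] = []
--     for item in list(lang_set or []):
--         lower = str(item).lower()
--         if "dub" in lower:
--             names.append("dub")
--         if "sub" in lower:
--             names.append("sub")
--     if not names:
--         names = ["sub"]
--     return sorted(set(names))
-- ===== SOURCE B (Python) =====
-- def list_languages(lang_set):
--     items = list(lang_set or [])
--     has_dub = any("dub" in str(x).lower() for x in items)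
--     has_sub = any("sub" in str(x).lower() for x in items)
--     out = []
--     if has_dub:
--         out.append("dub")
--     if has_sub:
--         out.append("sub")
--     return out or ["sub"]
-- ===== Notes on version B (the rewrite author's own statement) =====
-- stated objective: simpler
-- what changed: Replaces the append-then-sorted(set(...)) pipeline with two boolean any-scans and a direct construction of the (already deduplicated and ordered) result.
import Mathlib
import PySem

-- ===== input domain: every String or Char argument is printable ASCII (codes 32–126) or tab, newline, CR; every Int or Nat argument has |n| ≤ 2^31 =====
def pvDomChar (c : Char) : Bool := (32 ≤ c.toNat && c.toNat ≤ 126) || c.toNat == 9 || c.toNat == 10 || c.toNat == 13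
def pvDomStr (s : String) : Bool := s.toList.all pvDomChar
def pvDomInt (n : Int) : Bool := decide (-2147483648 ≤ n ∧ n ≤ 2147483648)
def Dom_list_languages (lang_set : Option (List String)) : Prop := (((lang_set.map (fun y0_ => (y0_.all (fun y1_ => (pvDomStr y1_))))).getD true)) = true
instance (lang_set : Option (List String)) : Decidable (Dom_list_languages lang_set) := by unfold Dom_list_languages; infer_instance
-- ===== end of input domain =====

-- B replaces A's append-then-sorted(set(...)) pipeline with two boolean scans and a direct
-- construction of the result (objective: simpler).

-- ===== PORT A =====
def list_languages (lang_set : Option (List String)) : List String :=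
  let names : List String :=
    (lang_set.getD []).foldl (fun names item =>
      let lower := PySem.Str.lower item
      let names := if PySem.Str.isIn "dub" lower then names ++ ["dub"] else names
      if PySem.Str.isIn "sub" lower then names ++ ["sub"] else names) []
  let names := if names = [] then ["sub"] else names
  PySem.List.sorted (PySem.Set.ofList names) (fun x => x) false

-- ===== PORT B =====
def list_languages_alt (lang_set : Option (List String)) : List String :=
  let items := lang_set.getD []
  let hasDub := items.any (fun x => PySem.Str.isIn "dub" (PySem.Str.lower x))
  let hasSub := items.any (fun x => PySem.Str.isIn "sub" (PySem.Str.lower x))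
  let out : List String := (if hasDub then ["dub"] else []) ++ (if hasSub then ["sub"] else [])
  if out = [] then ["sub"] else out

-- ===== PRECONDITION & SPEC =====
def Spec_list_languages (lang_set : Option (List String)) (out : List String) : Prop := out = list_languages_alt lang_set
instance (lang_set : Option (List String)) (out : List String) : Decidable (Spec_list_languages lang_set out) := by unfold Spec_list_languages; infer_instance

-- ===== CLAIM (what is proved, stated in full; the proofs are below) =====
def Claim_equal_list_languages : Prop := ∀ (lang_set : Option (List String)), Dom_list_languages lang_set → Spec_list_languages lang_set (list_languages lang_set)

-- ===== LEMMAS AND PROOFS =====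

-- A's loop body, written out (definitionally equal to the lambda in the port of A).
def llStep (names : List String) (item : String) : List String :=
  if PySem.Str.isIn "sub" (PySem.Str.lower item) then
    (if PySem.Str.isIn "dub" (PySem.Str.lower item) then names ++ ["dub"] else names) ++ ["sub"]
  else
    (if PySem.Str.isIn "dub" (PySem.Str.lower item) then names ++ ["dub"] else names)

-- Membership in A's accumulated names list, in terms of B's two any-scans.
lemma mem_fold_ll (items : List String) (acc : List String) (x : String) :
    x ∈ items.foldl llStep acc ↔
      x ∈ acc ∨ (x = "dub" ∧ items.any (fun y => PySem.Str.isIn "dub" (PySem.Str.lower y)) = true)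
              ∨ (x = "sub" ∧ items.any (fun y => PySem.Str.isIn "sub" (PySem.Str.lower y)) = true) := by
  induction items generalizing acc with
  | nil => simp
  | cons i t ih =>
      rw [List.foldl_cons, ih, List.any_cons, List.any_cons]
      unfold llStep
      generalize PySem.Str.isIn "dub" (PySem.Str.lower i) = bd
      generalize PySem.Str.isIn "sub" (PySem.Str.lower i) = bs
      generalize (t.any fun y => PySem.Str.isIn "dub" (PySem.Str.lower y)) = td
      generalize (t.any fun y => PySem.Str.isIn "sub" (PySem.Str.lower y)) = ts
      cases bd <;> cases bs <;> cases td <;> cases ts <;> simp <;> tauto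

-- The whole equivalence, at the level of the materialized item list.
lemma ll_main_list (items : List String) :
    PySem.List.sorted
        (PySem.Set.ofList
          (if items.foldl llStep [] = [] then ["sub"] else items.foldl llStep []))
        (fun x => x) false
      = (if ((if items.any (fun x => PySem.Str.isIn "dub" (PySem.Str.lower x)) then ["dub"] else []) ++
              (if items.any (fun x => PySem.Str.isIn "sub" (PySem.Str.lower x)) then ["sub"] else [])) = []
         then ["sub"]
         else (if items.any (fun x => PySem.Str.isIn "dub" (PySem.Str.lower x)) then ["dub"] else []) ++
              (if items.any (fun x => PySem.Str.isIn "sub" (PySem.Str.lower x)) then ["sub"] else [])) := by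
  set hd := items.any (fun x => PySem.Str.isIn "dub" (PySem.Str.lower x)) with hhd
  set hs := items.any (fun x => PySem.Str.isIn "sub" (PySem.Str.lower x)) with hhs
  set names := items.foldl llStep [] with hnames
  have hfold : ∀ x, x ∈ names ↔ (x = "dub" ∧ hd = true) ∨ (x = "sub" ∧ hs = true) := by
    intro x
    rw [hnames, hhd, hhs]
    simpa using mem_fold_ll items [] x
  by_cases hD : hd = true <;> by_cases hS : hs = true
  · have hne : names ≠ [] := by
      intro h; have := (hfold "dub").2 (Or.inl ⟨rfl, hD⟩); simp [h] at this
    rw [if_neg hne]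
    have hperm : (["dub", "sub"] : List String).Perm (PySem.Set.ofList names) := by
      refine (List.perm_ext_iff_of_nodup (by decide) (PySem.Set.nodup_ofList _)).2 ?_
      intro x
      rw [PySem.Set.mem_ofList, hfold]
      constructor
      · intro h; simp only [List.mem_cons, List.not_mem_nil, or_false] at h
        rcases h with h | h
        · exact Or.inl ⟨h, hD⟩
        · exact Or.inr ⟨h, hS⟩
      · rintro (⟨h, _⟩ | ⟨h, _⟩) <;> simp [h]
    rw [PySem.List.sorted_id_eq_of_perm_of_pairwise _ _ hperm
      (by simp only [List.pairwise_cons, List.mem_singleton, List.not_mem_nil, List.Pairwise.nil,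
            forall_eq, and_true, IsEmpty.forall_iff, implies_true]
          rw [String.le_iff_toList_le]; decide)]
    simp [hD, hS]
  · have hne : names ≠ [] := by
      intro h; have := (hfold "dub").2 (Or.inl ⟨rfl, hD⟩); simp [h] at this
    rw [if_neg hne]
    have hperm : (["dub"] : List String).Perm (PySem.Set.ofList names) := by
      refine (List.perm_ext_iff_of_nodup (by decide) (PySem.Set.nodup_ofList _)).2 ?_
      intro x
      rw [PySem.Set.mem_ofList, hfold]
      constructor
      · intro h; simp_all
      · rintro (⟨h, _⟩ | ⟨_, h⟩) <;> simp_all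
    rw [PySem.List.sorted_id_eq_of_perm_of_pairwise _ _ hperm (by decide)]
    simp [hD, hS]
  · have hne : names ≠ [] := by
      intro h; have := (hfold "sub").2 (Or.inr ⟨rfl, hS⟩); simp [h] at this
    rw [if_neg hne]
    have hperm : (["sub"] : List String).Perm (PySem.Set.ofList names) := by
      refine (List.perm_ext_iff_of_nodup (by decide) (PySem.Set.nodup_ofList _)).2 ?_
      intro x
      rw [PySem.Set.mem_ofList, hfold]
      constructor
      · intro h; simp_all
      · rintro (⟨_, h⟩ | ⟨h, _⟩) <;> simp_all
    rw [PySem.List.sorted_id_eq_of_perm_of_pairwise _ _ hperm (by decide)]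
    simp [hD, hS]
  · have hnil : names = [] := by
      rw [List.eq_nil_iff_forall_not_mem]
      intro x hx
      rcases (hfold x).1 hx with ⟨_, h⟩ | ⟨_, h⟩ <;> simp_all
    rw [hnil]
    simp only [hD, hS, if_neg, Bool.not_eq_true]
    simp
    decide

-- ===== VERDICT (by name: the statement is the Claim_ definition above) =====
theorem list_languages_spec : Claim_equal_list_languages := by
  intro lang_set _
  show PySem.List.sorted _ _ _ = _
  exact (ll_main_list (lang_set.getD [])).symm ▸ rfl
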